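-- pv_equiv track=rewrite | github.com/loadingsjy/algorithm | sliding_window/resultsArray.py | resultsArray2
-- ===== SOURCE A (Python) =====
-- def resultsArray2(nums: list[int], k: int) -> list[int]:
--     '''灵神写法'''
--     n = len(nums)
--     cnt = 0
--     ans = [-1] * (n - k + 1)
--     for i in range(n):
--         cnt = 1 if i == 0 or nums[i] - nums[i - 1] != 1 else cnt + 1
--         if cnt >= k:
--             ans[i - k + 1] = nums[i]
--     return ans
-- ===== SOURCE B (Python) =====
-- def resultsArray2(nums: list[int], k: int) -> list[int]:
--     n = len(nums)
--     ans = [-1] * (n - k + 1)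
--     start = 0
--     while start < n:
--         end = start
--         while end + 1 < n and nums[end + 1] - nums[end] == 1:
--             end += 1
--         for i in range(start, end + 1):
--             if i - start + 1 >= k:
--                 ans[i - k + 1] = nums[i]
--         start = end + 1
--     return ans
-- ===== Notes on version B (the rewrite author's own statement) =====
-- stated objective: alternative
-- what changed: Replaced the single flat pass with a running streak counter by a two-level structure: an outer loop that splits nums into maximal consecutive-increasing runs and an inner loop that fills the answer windows from each run, with no counter state carried across the scan.
import Mathlib
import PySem

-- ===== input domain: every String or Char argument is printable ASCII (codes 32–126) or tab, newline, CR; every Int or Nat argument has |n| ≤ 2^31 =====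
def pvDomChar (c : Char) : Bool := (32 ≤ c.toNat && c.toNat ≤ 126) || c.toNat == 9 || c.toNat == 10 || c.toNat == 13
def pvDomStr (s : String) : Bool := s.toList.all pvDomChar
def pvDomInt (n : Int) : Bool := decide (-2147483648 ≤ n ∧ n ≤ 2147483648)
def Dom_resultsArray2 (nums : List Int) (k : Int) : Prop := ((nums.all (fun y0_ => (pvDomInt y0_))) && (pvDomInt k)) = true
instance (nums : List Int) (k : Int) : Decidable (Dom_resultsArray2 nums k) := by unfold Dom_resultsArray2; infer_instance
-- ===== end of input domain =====

-- B replaces A's flat streak-counter pass by an outer loop over maximal consecutive runs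
-- with an inner fill loop per run (objective: alternative decomposition, same cost).

-- ===== PORT A =====
-- A's 'for i in range(n)' loop, as a recursion over i with state (cnt, ans);
-- fuel = number of remaining iterations (nums.length at the initial call) makes it structural
def pvALoop (nums : List Int) (k : Int) (fuel : Nat) (i : Nat) (cnt : Int) (ans : List Int) : List Int :=
  match fuel with
  | 0 => ans
  | fuel + 1 =>
    if i < nums.length then
      let cnt' : Int :=
        if i = 0 ∨ PySem.List.pyGetD nums (i : Int) 0 - PySem.List.pyGetD nums ((i : Int) - 1) 0 ≠ 1
        then 1 else cnt + 1
      let ans' :=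
        if cnt' ≥ k then PySem.List.pySetD ans ((i : Int) - k + 1) (PySem.List.pyGetD nums (i : Int) 0)
        else ans
      pvALoop nums k fuel (i + 1) cnt' ans'
    else ans

def resultsArray2 (nums : List Int) (k : Int) : List Int :=
  pvALoop nums k nums.length 0 0 (PySem.List.pyRepeat [(-1 : Int)] ((nums.length : Int) - k + 1))

-- ===== PORT B =====
-- B's inner while loop: advance end while the next element continues the run (fuel = loop bound)
def pvRunEnd (nums : List Int) (fuel : Nat) (e : Nat) : Nat :=
  match fuel with
  | 0 => e
  | fuel + 1 =>
    if e + 1 < nums.length ∧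
        PySem.List.pyGetD nums ((e : Int) + 1) 0 - PySem.List.pyGetD nums (e : Int) 0 = 1 then
      pvRunEnd nums fuel (e + 1)
    else e

-- B's 'for i in range(start, end + 1)' fill loop; fuel = end + 1 - start iterations
def pvFillRun (nums : List Int) (k : Int) (s : Nat) (fuel : Nat) (i : Nat) (ans : List Int) : List Int :=
  match fuel with
  | 0 => ans
  | fuel + 1 =>
    pvFillRun nums k s fuel (i + 1)
      (if ((i : Int) - (s : Int) + 1) ≥ k then
        PySem.List.pySetD ans ((i : Int) - k + 1) (PySem.List.pyGetD nums (i : Int) 0)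
      else ans)

-- B's outer while loop over run starts (fuel = loop bound, nums.length at the initial call)
def pvOuter (nums : List Int) (k : Int) (fuel : Nat) (s : Nat) (ans : List Int) : List Int :=
  match fuel with
  | 0 => ans
  | fuel + 1 =>
    if s < nums.length then
      pvOuter nums k fuel (pvRunEnd nums nums.length s + 1)
        (pvFillRun nums k s (pvRunEnd nums nums.length s + 1 - s) s ans)
    else ans

def resultsArray2_alt (nums : List Int) (k : Int) : List Int :=
  pvOuter nums k nums.length 0 (PySem.List.pyRepeat [(-1 : Int)] ((nums.length : Int) - k + 1))

-- ===== PRECONDITION & SPEC =====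
def Spec_resultsArray2 (nums : List Int) (k : Int) (out : List Int) : Prop := out = resultsArray2_alt nums k
instance (nums : List Int) (k : Int) (out : List Int) : Decidable (Spec_resultsArray2 nums k out) := by unfold Spec_resultsArray2; infer_instance

-- ===== CLAIM (what is proved, stated in full; the proofs are below) =====
def Claim_equal_resultsArray2 : Prop := ∀ (nums : List Int) (k : Int), Dom_resultsArray2 nums k → Spec_resultsArray2 nums k (resultsArray2 nums k)

-- ===== LEMMAS AND PROOFS =====

theorem pvRunEnd_ge (nums : List Int) (f : Nat) : ∀ e : Nat, e ≤ pvRunEnd nums f e := by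
  induction f with
  | zero => intro e; exact le_rfl
  | succ f ih =>
    intro e
    rw [pvRunEnd]
    split
    · exact le_trans (by omega) (ih (e + 1))
    · exact le_rfl

theorem pvRunEnd_lt (nums : List Int) (f : Nat) :
    ∀ e : Nat, e < nums.length → pvRunEnd nums f e < nums.length := by
  induction f with
  | zero => intro e he; exact he
  | succ f ih =>
    intro e he
    rw [pvRunEnd]
    split
    · rename_i h; exact ih (e + 1) h.1
    · exact he

theorem pvRunEnd_chain (nums : List Int) (f : Nat) :
    ∀ e m : Nat, e ≤ m → m < pvRunEnd nums f e →
      PySem.List.pyGetD nums ((m : Int) + 1) 0 - PySem.List.pyGetD nums (m : Int) 0 = 1 := by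
  induction f with
  | zero => intro e m h1 h2; rw [pvRunEnd] at h2; omega
  | succ f ih =>
    intro e m h1 h2
    rw [pvRunEnd] at h2
    by_cases hg : e + 1 < nums.length ∧
        PySem.List.pyGetD nums ((e : Int) + 1) 0 - PySem.List.pyGetD nums (e : Int) 0 = 1
    · rw [if_pos hg] at h2
      rcases Nat.eq_or_lt_of_le h1 with rfl | hlt
      · exact hg.2
      · exact ih (e + 1) m hlt h2
    · rw [if_neg hg] at h2; omega

theorem pvRunEnd_stop (nums : List Int) (f : Nat) :
    ∀ e : Nat, nums.length ≤ f + e + 1 →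
      pvRunEnd nums f e + 1 < nums.length →
      PySem.List.pyGetD nums ((pvRunEnd nums f e : Int) + 1) 0 -
        PySem.List.pyGetD nums ((pvRunEnd nums f e : Int)) 0 ≠ 1 := by
  induction f with
  | zero =>
    intro e hf hlt
    rw [pvRunEnd] at hlt
    omega
  | succ f ih =>
    intro e hf hlt
    rw [pvRunEnd] at hlt ⊢
    by_cases hg : e + 1 < nums.length ∧
        PySem.List.pyGetD nums ((e : Int) + 1) 0 - PySem.List.pyGetD nums (e : Int) 0 = 1
    · rw [if_pos hg] at hlt ⊢
      exact ih (e + 1) (by omega) hlt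
    · rw [if_neg hg] at hlt ⊢
      intro hc
      exact hg ⟨by omega, hc⟩


theorem pvALoop_done (nums : List Int) (k : Int) (f s : Nat) (cnt : Int) (ans : List Int)
    (h : nums.length ≤ s) : pvALoop nums k f s cnt ans = ans := by
  match f with
  | 0 => rw [pvALoop]
  | f + 1 => rw [pvALoop, if_neg (by omega)]

theorem pvOuter_done (nums : List Int) (k : Int) (f s : Nat) (ans : List Int)
    (h : nums.length ≤ s) : pvOuter nums k f s ans = ans := by
  match f with
  | 0 => rw [pvOuter]
  | f + 1 => rw [pvOuter, if_neg (by omega)]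

-- within one run, A's loop performs exactly B's fill loop, then continues after the run
theorem pvWR (nums : List Int) (k : Int) (s e : Nat) (hel : e < nums.length)
    (hchain : ∀ m, s ≤ m → m < e →
      PySem.List.pyGetD nums ((m : Int) + 1) 0 - PySem.List.pyGetD nums (m : Int) 0 = 1)
    (hstart : s = 0 ∨
      PySem.List.pyGetD nums (s : Int) 0 - PySem.List.pyGetD nums ((s : Int) - 1) 0 ≠ 1) :
    ∀ (d : Nat) (fuel i : Nat) (cnt : Int) (ans : List Int), i + d = e → s ≤ i →
      (s < i → cnt = (i : Int) - (s : Int)) →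
      pvALoop nums k (fuel + d + 1) i cnt ans =
        pvALoop nums k fuel (e + 1) ((e : Int) - (s : Int) + 1)
          (pvFillRun nums k s (d + 1) i ans) := by
  intro d
  induction d with
  | zero =>
    intro fuel i cnt ans hd hsi hcnt
    have hie : i = e := by omega
    subst hie
    rw [pvALoop, pvFillRun, pvFillRun]
    rw [if_pos hel]
    have hcnt' : (if i = 0 ∨ PySem.List.pyGetD nums (i : Int) 0 -
        PySem.List.pyGetD nums ((i : Int) - 1) 0 ≠ 1 then (1 : Int) else cnt + 1)
        = (i : Int) - (s : Int) + 1 := by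
      rcases Nat.eq_or_lt_of_le hsi with rfl | hlt
      · rcases hstart with h0 | hne
        · rw [if_pos (Or.inl h0)]; omega
        · rw [if_pos (Or.inr hne)]; omega
      · have h1 : ((i - 1 : Nat) : Int) + 1 = (i : Int) := by omega
        have h2 : ((i - 1 : Nat) : Int) = (i : Int) - 1 := by omega
        have hc := hchain (i - 1) (by omega) (by omega)
        rw [h1, h2] at hc
        rw [if_neg]
        · rw [hcnt hlt]
        · intro h; rcases h with h | h
          · omega
          · exact h hc
    rw [hcnt']
  | succ d ih =>
    intro fuel i cnt ans hd hsi hcnt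
    have hie2 : i < e := by omega
    have hi : i < nums.length := by omega
    have hfu : fuel + (d + 1) + 1 = (fuel + d + 1) + 1 := by omega
    rw [hfu, pvALoop, if_pos hi]
    have hcnt' : (if i = 0 ∨ PySem.List.pyGetD nums (i : Int) 0 -
        PySem.List.pyGetD nums ((i : Int) - 1) 0 ≠ 1 then (1 : Int) else cnt + 1)
        = (i : Int) - (s : Int) + 1 := by
      rcases Nat.eq_or_lt_of_le hsi with rfl | hlt
      · rcases hstart with h0 | hne
        · rw [if_pos (Or.inl h0)]; omega
        · rw [if_pos (Or.inr hne)]; omega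
      · have h1 : ((i - 1 : Nat) : Int) + 1 = (i : Int) := by omega
        have h2 : ((i - 1 : Nat) : Int) = (i : Int) - 1 := by omega
        have hc := hchain (i - 1) (by omega) (by omega)
        rw [h1, h2] at hc
        rw [if_neg]
        · rw [hcnt hlt]
        · intro h; rcases h with h | h
          · omega
          · exact h hc
    rw [hcnt']
    conv_rhs => rw [pvFillRun]
    exact ih fuel (i + 1)
      ((i : Int) - (s : Int) + 1)
      (if ((i : Int) - (s : Int) + 1) ≥ k then
        PySem.List.pySetD ans ((i : Int) - k + 1) (PySem.List.pyGetD nums (i : Int) 0) else ans)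
      (by omega) (by omega) (by intro _; push_cast; ring)

-- A's loop at a run start, with any counter and enough fuel, equals B's outer loop there
theorem pvML (nums : List Int) (k : Int) :
    ∀ (fo : Nat) (s : Nat) (fa : Nat) (cnt : Int) (ans : List Int),
      nums.length ≤ s + fa → nums.length ≤ s + fo →
      (s = 0 ∨
        PySem.List.pyGetD nums (s : Int) 0 - PySem.List.pyGetD nums ((s : Int) - 1) 0 ≠ 1) →
      pvALoop nums k fa s cnt ans = pvOuter nums k fo s ans := by
  intro fo
  induction fo with
  | zero =>
    intro s fa cnt ans hfa hfo hstart
    rw [pvOuter]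
    exact pvALoop_done nums k _ _ _ _ (by omega)
  | succ fo ih =>
    intro s fa cnt ans hfa hfo hstart
    rw [pvOuter]
    by_cases hs : s < nums.length
    · rw [if_pos hs]
      have hge := pvRunEnd_ge nums nums.length s
      have hel : pvRunEnd nums nums.length s < nums.length := pvRunEnd_lt nums nums.length s hs
      have hfa2 : fa = (fa - (pvRunEnd nums nums.length s - s) - 1) +
          (pvRunEnd nums nums.length s - s) + 1 := by omega
      have hd2 : pvRunEnd nums nums.length s + 1 - s = (pvRunEnd nums nums.length s - s) + 1 := by
        omega
      rw [hfa2, hd2,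
        pvWR nums k s (pvRunEnd nums nums.length s) hel
          (pvRunEnd_chain nums nums.length s) hstart
          (pvRunEnd nums nums.length s - s)
          (fa - (pvRunEnd nums nums.length s - s) - 1) s cnt ans (by omega) le_rfl (by omega)]
      by_cases hn : pvRunEnd nums nums.length s + 1 < nums.length
      · have hstop := pvRunEnd_stop nums nums.length s (by omega) hn
        have h1 : ((pvRunEnd nums nums.length s + 1 : Nat) : Int) =
            (pvRunEnd nums nums.length s : Int) + 1 := by omega
        have h2 : ((pvRunEnd nums nums.length s : Int) + 1) - 1 =
            (pvRunEnd nums nums.length s : Int) := by ring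
        exact ih (pvRunEnd nums nums.length s + 1) _ _ _
          (by omega) (by omega) (Or.inr (by rw [h1, h2]; exact hstop))
      · rw [pvALoop_done nums k _ _ _ _ (by omega), pvOuter_done nums k _ _ _ (by omega)]
    · rw [if_neg hs]
      exact pvALoop_done nums k _ _ _ _ (by omega)

-- ===== VERDICT (by name: the statement is the Claim_ definition above) =====
theorem resultsArray2_spec : Claim_equal_resultsArray2 := by
  intro nums k _
  unfold Spec_resultsArray2 resultsArray2 resultsArray2_alt
  exact pvML nums k nums.length 0 nums.length 0 _ (by omega) (by omega) (Or.inl rfl)
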